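-- pv_equiv track=rewrite | github.com/JeongSae/Algorithm | programmers/Level1/문자열 나누기.py | solution
-- ===== SOURCE A (Python) =====
-- def solution(s):
--     s = list(s)
--     answer = 0
--     main, sub = 1, 0
--     main_s = s.pop(0)
--
--     for string in s:
--         if main == sub:
--             answer += 1
--             main_s = string
--
--         if main_s == string:
--             main += 1
--         else:
--             sub += 1
--
--     return answer + 1
-- ===== SOURCE B (Python) =====
-- def solution(s):
--     # Precompute, per leader character x (memoized), the prefix-balance array
--     # g (g[p] = #x - #non-x over s[:p]) and a next-equal-balance index nxt
--     # (nxt[p] = smallest q > p with g[q] == g[p], else n + 1).  Each group cut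
--     # is then a single table jump: the group starting at i ends at nxt[i].
--     n = len(s)
--     cache = {}
--     answer = 0
--     i = 0
--     while i < n:
--         x = s[i]
--         if x not in cache:
--             bal = 0
--             g = [0]
--             for c in s:
--                 bal += 1 if c == x else -1
--                 g.append(bal)
--             seen = {}
--             nxt = []
--             for p in range(n, -1, -1):
--                 nxt.append(seen.get(g[p], n + 1))
--                 seen[g[p]] = p
--             nxt.reverse()
--             cache[x] = nxt
--         j = cache[x][i]
--         i = j if j <= n else n
--         answer += 1
--     return answer
-- ===== Notes on version B (the rewrite author's own statement) =====
-- stated objective: alternative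
-- what changed: Replaced A's single stateful counter scan by a table-driven algorithm: per leader character (memoized in a dict) B precomputes the prefix-balance array and a next-equal-balance index, then finds each group cut with a single table jump instead of counting inside the group.
import Mathlib
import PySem

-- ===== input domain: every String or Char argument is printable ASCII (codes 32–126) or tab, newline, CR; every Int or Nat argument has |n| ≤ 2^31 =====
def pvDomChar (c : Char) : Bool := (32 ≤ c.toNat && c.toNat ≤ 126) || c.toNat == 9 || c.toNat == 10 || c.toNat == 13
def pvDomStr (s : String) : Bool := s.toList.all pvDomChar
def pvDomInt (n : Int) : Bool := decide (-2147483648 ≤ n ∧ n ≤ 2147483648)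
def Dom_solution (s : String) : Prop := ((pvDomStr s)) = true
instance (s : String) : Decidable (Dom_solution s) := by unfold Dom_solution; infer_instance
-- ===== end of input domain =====

-- B replaces A's single stateful counter scan by a table-driven algorithm:
-- per leader character (memoized) it precomputes the prefix-balance array and
-- a next-equal-balance index, then each group cut is one table jump.
-- A raises IndexError on "" (excluded by Pre_); B returns 0 there.

-- ===== PORT A =====
-- A: pop the first char as main_s, then one flat fold over the rest with state
-- (answer, main, sub, main_s); return answer + 1.  ("" raises: outside Pre_.)
def solution (s : String) : Int :=
  match s.toList with
  | [] => 0  -- Python raises IndexError here; outside Pre_solution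
  | main_s :: rest =>
    let st := rest.foldl
      (fun (acc : Int × Int × Int × Char) (string : Char) =>
        let answer := acc.1
        let main := acc.2.1
        let sub := acc.2.2.1
        let main_s := acc.2.2.2
        let answer' := if main == sub then answer + 1 else answer
        let main_s' := if main == sub then string else main_s
        if main_s' == string then (answer', main + 1, sub, main_s')
        else (answer', main, sub + 1, main_s'))
      (0, 1, 0, main_s)
    st.1 + 1

-- ===== PORT B =====
-- Source B's g-building loop: bal = 0; g = [0]; for c in s: bal += ±1; g.append(bal)
def pvBuildG (x : Char) (cs : List Char) : List Int :=
  (cs.foldl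
    (fun (st : Int × List Int) c =>
      let bal := st.1 + (if c == x then 1 else -1)
      (bal, st.2 ++ [bal]))
    (0, [0])).2

-- Source B's nxt-building loop: seen = {}; nxt = []; for p in range(n, -1, -1):
--   nxt.append(seen.get(g[p], n+1)); seen[g[p]] = p;  nxt.reverse()
-- (g[p] is always in range here, so pyGet? … |>.getD 0 is exact)
def pvBuildNxt (g : List Int) (n : Int) : List Int :=
  ((PySem.List.pyRange n (-1) (-1)).foldl
    (fun (st : PySem.Dict Int Int × List Int) p =>
      let v := (PySem.List.pyGet? g p).getD 0
      (st.1.insert v p, st.2 ++ [(st.1.get? v).getD (n + 1)]))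
    (PySem.Dict.empty, [])).2.reverse

-- Source B's outer while loop (fuel = its iteration count bound; each pass moves
-- i forward, so cs.length + 1 always suffices).  Indexing s[i] and cache[x][i]
-- is always in range here, so the .getD defaults are exact.
def pvLoop (cs : List Char) (n : Int) (fuel : Nat) (i answer : Int)
    (cache : PySem.Dict Char (List Int)) : Int :=
  match fuel with
  | 0 => answer
  | fuel + 1 =>
    if i < n then
      let x := (PySem.List.pyGet? cs i).getD 'a'
      let cache' :=
        match cache.get? x with
        | some _ => cache
        | none => cache.insert x (pvBuildNxt (pvBuildG x cs) n)
      let nxt := (cache'.get? x).getD []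
      let j := (PySem.List.pyGet? nxt i).getD 0
      pvLoop cs n fuel (if j ≤ n then j else n) (answer + 1) cache'
    else answer

def solution_alt (s : String) : Int :=
  pvLoop s.toList (s.toList.length : Int) (s.toList.length + 1) 0 0 PySem.Dict.empty

-- ===== PRECONDITION & SPEC =====
-- Pre_ excludes only the empty string, on which A raises IndexError (s.pop(0));
-- B's own algorithm returns 0 there.
def Pre_solution (s : String) : Prop := s ≠ ""
instance (s : String) : Decidable (Pre_solution s) := by unfold Pre_solution; infer_instance
def pvWitness_solution : String := "aabbaccc"

def Spec_solution (s : String) (out : Int) : Prop := out = solution_alt s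
instance (s : String) (out : Int) : Decidable (Spec_solution s out) := by unfold Spec_solution; infer_instance

-- ===== CLAIM =====
def Claim_equal_solution : Prop := ∀ (s : String), Dom_solution s → Pre_solution s → Spec_solution s (solution s)

-- ===== LEMMAS AND PROOFS =====

-- ---------- A-side abstraction: only the balance d = main - sub matters ----------
def pvAbsA (chars : List Char) (ms : Char) (d answer : Int) : Int :=
  match chars with
  | [] => answer
  | c :: rest =>
    if d = 0 then pvAbsA rest c 1 (answer + 1)
    else pvAbsA rest ms (if ms == c then d + 1 else d - 1) answer

theorem pvFoldA_eq_absA (chars : List Char) (ms : Char) (answer main sub : Int) :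
    (chars.foldl
      (fun (acc : Int × Int × Int × Char) (string : Char) =>
        let answer := acc.1
        let main := acc.2.1
        let sub := acc.2.2.1
        let main_s := acc.2.2.2
        let answer' := if main == sub then answer + 1 else answer
        let main_s' := if main == sub then string else main_s
        if main_s' == string then (answer', main + 1, sub, main_s')
        else (answer', main, sub + 1, main_s'))
      (answer, main, sub, ms)).1 = pvAbsA chars ms (main - sub) answer := by
  induction chars generalizing ms answer main sub with
  | nil => simp [pvAbsA]
  | cons c rest ih =>
    simp only [List.foldl]
    by_cases h : main = sub
    · subst h
      simp only [beq_self_eq_true, if_true, pvAbsA, sub_self]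
      rw [ih]
      have : main + 1 - main = 1 := by omega
      rw [this]
    · have hb : (main == sub) = false := by simp [h]
      have hd : ¬ (main - sub = 0) := by omega
      simp only [hb, Bool.false_eq_true, if_false, pvAbsA, if_neg hd]
      by_cases hm : ms = c
      · subst hm
        simp only [beq_self_eq_true, if_true]
        rw [ih]
        have : main + 1 - sub = main - sub + 1 := by omega
        rw [this]
      · have hms : (ms == c) = false := by simp [hm]
        simp only [hms, Bool.false_eq_true, if_false]
        rw [ih]
        have : main - (sub + 1) = main - sub - 1 := by omega
        rw [this]

-- At a group boundary (d = 0) the remembered leader is irrelevant.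
theorem pvAbsA_leader_irrel (u : List Char) (x y : Char) (a : Int) :
    pvAbsA u x 0 a = pvAbsA u y 0 a := by
  cases u <;> simp [pvAbsA]

-- ---------- the prefix-balance walk and first-occurrence search ----------
def pvWalk (x : Char) (b : Int) : List Char → List Int
  | [] => []
  | c :: t =>
    (b + (if c == x then 1 else -1)) :: pvWalk x (b + (if c == x then 1 else -1)) t

def pvFindIdx (v : Int) (q : Nat) : List Int → Option Nat
  | [] => none
  | a :: t => if a = v then some q else pvFindIdx v (q + 1) t

def pvGL (x : Char) (cs : List Char) : List Int := 0 :: pvWalk x 0 cs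

def pvNxtVal (g : List Int) (nN : Nat) (p : Nat) : Int :=
  match pvFindIdx (g.getD p 0) (p + 1) (g.drop (p + 1)) with
  | some q => (q : Int)
  | none => (nN : Int) + 1

theorem length_pvWalk (x : Char) (b : Int) (cs : List Char) :
    (pvWalk x b cs).length = cs.length := by
  induction cs generalizing b with
  | nil => rfl
  | cons c t ih => simp [pvWalk, ih]

theorem pvWalk_drop (x : Char) (t : List Char) :
    ∀ (i : Nat) (b : Int), i ≤ t.length →
      (pvWalk x b t).drop i = pvWalk x ((b :: pvWalk x b t).getD i b) (t.drop i) := by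
  induction t with
  | nil =>
    intro i b hi
    have hi0 : i = 0 := by simpa using hi
    subst hi0
    simp [pvWalk]
  | cons c t ih =>
    intro i b hi
    match i with
    | 0 => simp
    | i + 1 =>
      have hi' : i ≤ t.length := by simpa using hi
      simp only [pvWalk, List.drop_succ_cons]
      rw [ih i _ hi']
      congr 1
      have h1 : i < ((b + (if c == x then 1 else -1)) :: pvWalk x (b + (if c == x then 1 else -1)) t).length := by
        simp only [List.length_cons, length_pvWalk]
        omega
      have h2 : i + 1 < (b :: (b + (if c == x then 1 else -1)) :: pvWalk x (b + (if c == x then 1 else -1)) t).length := by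
        simp only [List.length_cons, length_pvWalk]
        omega
      rw [List.getD_eq_getElem _ _ h1, List.getD_eq_getElem _ _ h2]
      simp

theorem pvGL_drop (x : Char) (cs : List Char) (i : Nat) (hi : i ≤ cs.length) :
    (pvGL x cs).drop (i + 1) = pvWalk x ((pvGL x cs).getD i 0) (cs.drop i) := by
  simp only [pvGL, List.drop_succ_cons]
  exact pvWalk_drop x cs i 0 hi

theorem pvFindIdx_base (v : Int) (t : List Int) :
    ∀ q : Nat, pvFindIdx v q t = (pvFindIdx v 0 t).map (fun k => k + q) := by
  induction t with
  | nil => intro q; rfl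
  | cons a t ih =>
    intro q
    simp only [pvFindIdx]
    split
    · simp
    · rw [ih (q + 1), ih 1]
      cases pvFindIdx v 0 t with
      | none => rfl
      | some k =>
        simp only [Option.map_some, Option.some.injEq]
        omega

theorem pvFindIdx_shift (x : Char) (t : List Char) :
    ∀ (q : Nat) (b off v : Int),
      pvFindIdx (v + off) q (pvWalk x (b + off) t) = pvFindIdx v q (pvWalk x b t) := by
  induction t with
  | nil => intros; rfl
  | cons c t ih =>
    intro q b off v
    simp only [pvWalk, pvFindIdx]
    have harith : b + off + (if c == x then 1 else -1)
        = (b + (if c == x then 1 else -1)) + off := by ring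
    rw [harith]
    by_cases h : b + (if c == x then 1 else -1) = v
    · rw [if_pos (by omega), if_pos h]
    · rw [if_neg (by omega), if_neg h, ih]

theorem pvFindIdx_bounds (v : Int) :
    ∀ (t : List Int) (q r : Nat), pvFindIdx v q t = some r → q ≤ r ∧ r < q + t.length := by
  intro t
  induction t with
  | nil => intro q r h; simp [pvFindIdx] at h
  | cons a t ih =>
    intro q r h
    simp only [pvFindIdx] at h
    split at h
    · cases h; simp
    · have := ih (q + 1) r h
      simp only [List.length_cons]
      omega

-- ---------- A's loop from a mid-group state follows the walk to its first zero ----------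
theorem pvAbsA_midgroup (x : Char) (t : List Char) :
    ∀ (d a : Int), d ≠ 0 →
      pvAbsA t x d a =
        match pvFindIdx 0 0 (pvWalk x d t) with
        | some k => pvAbsA (t.drop (k + 1)) x 0 a
        | none => a := by
  induction t with
  | nil => intro d a _; rfl
  | cons c t ih =>
    intro d a hd
    have hstep : (if x == c then d + 1 else d - 1) = d + (if c == x then 1 else -1) := by
      by_cases h : x = c
      · subst h; simp
      · have h1 : (x == c) = false := by simp [h]
        have h2 : (c == x) = false := by simp [Ne.symm h]
        rw [h1, h2]
        simp only [Bool.false_eq_true, if_false]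
        omega
    simp only [pvAbsA, if_neg hd, hstep, pvWalk, pvFindIdx]
    by_cases h0 : d + (if c == x then 1 else -1) = 0
    · rw [if_pos h0, h0]
      simp
    · rw [if_neg h0, ih _ a h0, pvFindIdx_base 0 _ 1]
      cases pvFindIdx 0 0 (pvWalk x (d + (if c == x then 1 else -1)) t) with
      | none => rfl
      | some k => simp

-- ---------- pvBuildG builds the prefix-balance list ----------
theorem pvBuildG_eq (x : Char) (cs : List Char) : pvBuildG x cs = pvGL x cs := by
  suffices h : ∀ (t : List Char) (b : Int) (l : List Int),
      (t.foldl
        (fun (st : Int × List Int) c =>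
          let bal := st.1 + (if c == x then 1 else -1)
          (bal, st.2 ++ [bal]))
        (b, l)).2 = l ++ pvWalk x b t by
    simpa [pvBuildG, pvGL] using h cs 0 [0]
  intro t
  induction t with
  | nil => intro b l; simp [pvWalk]
  | cons c t ih =>
    intro b l
    simp only [List.foldl, pvWalk]
    rw [ih]
    simp

-- ---------- pvBuildNxt builds the next-equal-balance table ----------
theorem pvNxtVal_eq_getD (g : List Int) (nN p : Nat) :
    pvNxtVal g nN p
      = ((pvFindIdx (g.getD p 0) (p + 1) (g.drop (p + 1))).map (fun q => Int.ofNat q)).getD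
          (((nN : Nat) : Int) + 1) := by
  unfold pvNxtVal
  cases pvFindIdx (g.getD p 0) (p + 1) (g.drop (p + 1)) <;> simp

theorem pvBuildNxt_desc (g : List Int) (nN : Nat) (hlen : g.length = nN + 1) :
    ∀ (m : Nat), m < g.length →
      ∀ (seen : PySem.Dict Int Int) (acc : List Int),
        (∀ v : Int, seen.get? v
            = (pvFindIdx v (m + 1) (g.drop (m + 1))).map (fun q => Int.ofNat q)) →
        ((PySem.List.pyRange (m : Int) (-1) (-1)).foldl
          (fun (st : PySem.Dict Int Int × List Int) p =>
            let v := (PySem.List.pyGet? g p).getD 0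
            (st.1.insert v p, st.2 ++ [(st.1.get? v).getD (((nN : Nat) : Int) + 1)]))
          (seen, acc)).2
        = acc ++ (List.range (m + 1)).reverse.map (pvNxtVal g nN) := by
  intro m
  induction m with
  | zero =>
    intro _ seen acc hseen
    rw [PySem.List.pyRange_neg_one_cons (by omega), PySem.List.pyRange_neg_one_eq_nil (by omega)]
    have hg : PySem.List.pyGet? g (((0:Nat)) : Int) = some (g.getD 0 0) := by
      rw [PySem.List.pyGet?_natCast]
      rw [List.getElem?_eq_getElem (by omega), List.getD_eq_getElem _ _ (by omega)]
    simp only [List.foldl]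
    rw [hg]
    simp only [Option.getD_some]
    rw [hseen, ← pvNxtVal_eq_getD]
    simp
  | succ m ih =>
    intro hm seen acc hseen
    have hm' : m + 1 < g.length := hm
    rw [PySem.List.pyRange_neg_one_cons (by push_cast; omega)]
    rw [show ((m + 1 : Nat) : Int) - 1 = ((m : Nat) : Int) by push_cast; ring]
    have hg : PySem.List.pyGet? g ((m + 1 : Nat) : Int) = some (g.getD (m + 1) 0) := by
      rw [PySem.List.pyGet?_natCast,
        List.getElem?_eq_getElem (by omega), List.getD_eq_getElem _ _ (by omega)]
    simp only [List.foldl]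
    rw [hg]
    simp only [Option.getD_some]
    rw [ih (by omega) _ _ ?inv]
    case inv =>
      intro v
      have hdrop : g.drop (m + 1) = g.getD (m + 1) 0 :: g.drop (m + 1 + 1) := by
        rw [List.drop_eq_getElem_cons hm', List.getD_eq_getElem _ _ hm']
      rw [hdrop]
      simp only [pvFindIdx]
      rw [PySem.Dict.get?_insert]
      by_cases hv : v = g.getD (m + 1) 0
      · rw [if_pos hv, if_pos hv.symm]
        simp
      · rw [if_neg hv, if_neg (Ne.symm hv), hseen]
    rw [hseen, ← pvNxtVal_eq_getD]
    rw [List.range_succ (n := m + 1), List.reverse_append]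
    simp

theorem pvBuildNxt_eq (g : List Int) (nN : Nat) (hlen : g.length = nN + 1) :
    pvBuildNxt g ((nN : Nat) : Int) = (List.range (nN + 1)).map (pvNxtVal g nN) := by
  unfold pvBuildNxt
  rw [pvBuildNxt_desc g nN hlen nN (by omega) PySem.Dict.empty [] ?_]
  · simp [List.map_reverse]
  · intro v
    rw [PySem.Dict.get?_empty]
    have : g.drop (nN + 1) = [] := by
      apply List.drop_eq_nil_of_le; omega
    rw [this]
    rfl

-- ---------- one group = one table jump ----------
theorem pvGroup_step (cs : List Char) (iN : Nat) (h : iN < cs.length) (y : Char) (a : Int) :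
    pvAbsA (cs.drop iN) y 0 a =
      match pvFindIdx ((pvGL cs[iN] cs).getD iN 0) (iN + 1) ((pvGL cs[iN] cs).drop (iN + 1)) with
      | some q => pvAbsA (cs.drop q) y 0 (a + 1)
      | none => a + 1 := by
  set x := cs[iN] with hx
  have hdropc : cs.drop iN = x :: cs.drop (iN + 1) := List.drop_eq_getElem_cons h
  set b := (pvGL x cs).getD iN 0 with hb
  have hgl : (pvGL x cs).drop (iN + 1)
      = (b + 1) :: pvWalk x (b + 1) (cs.drop (iN + 1)) := by
    rw [pvGL_drop x cs iN (by omega), hdropc]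
    simp only [pvWalk, beq_self_eq_true, if_true]
    rw [← hb]
  rw [hgl]
  simp only [pvFindIdx, if_neg (by omega : ¬ (b + 1 = b))]
  rw [pvFindIdx_base, show pvFindIdx b 0 (pvWalk x (b + 1) (cs.drop (iN + 1)))
      = pvFindIdx 0 0 (pvWalk x 1 (cs.drop (iN + 1))) by
    have := pvFindIdx_shift x (cs.drop (iN + 1)) 0 1 b 0
    simpa [add_comm] using this]
  rw [hdropc]
  have hrestart : pvAbsA (x :: cs.drop (iN + 1)) y 0 a
      = pvAbsA (cs.drop (iN + 1)) x 1 (a + 1) := by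
    simp [pvAbsA]
  rw [hrestart, pvAbsA_midgroup x (cs.drop (iN + 1)) 1 (a + 1) (by omega)]
  cases hf : pvFindIdx 0 0 (pvWalk x 1 (cs.drop (iN + 1))) with
  | none => rfl
  | some k =>
    simp only [Option.map_some]
    rw [List.drop_drop]
    rw [pvAbsA_leader_irrel _ x y]
    congr 2
    omega

-- ---------- the outer loop with its cache invariant ----------
def pvCacheOK (cs : List Char) (cache : PySem.Dict Char (List Int)) : Prop :=
  ∀ x v, cache.get? x = some v → v = pvBuildNxt (pvBuildG x cs) ((cs.length : Nat) : Int)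

theorem pvLoop_eq (cs : List Char) :
    ∀ (fuel : Nat) (iN : Nat) (a : Int) (cache : PySem.Dict Char (List Int)),
      iN ≤ cs.length → cs.length - iN < fuel → pvCacheOK cs cache →
      pvLoop cs ((cs.length : Nat) : Int) fuel ((iN : Nat) : Int) a cache
        = pvAbsA (cs.drop iN) 'a' 0 a := by
  intro fuel
  induction fuel with
  | zero => intro iN a cache h1 h2 _; omega
  | succ fuel ih =>
    intro iN a cache hle hfuel hcache
    rcases Nat.lt_or_ge iN cs.length with hlt | hge
    case inr =>
      have hi : iN = cs.length := by omega
      subst hi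
      rw [pvLoop]
      rw [if_neg (by exact_mod_cast lt_irrefl _), List.drop_length]
      rfl
    case inl =>
      have hx : (PySem.List.pyGet? cs ((iN : Nat) : Int)).getD 'a' = cs[iN] := by
        rw [PySem.List.pyGet?_natCast, List.getElem?_eq_getElem hlt]
        rfl
      set x := cs[iN] with hxdef
      set nxtT := pvBuildNxt (pvBuildG x cs) ((cs.length : Nat) : Int) with hnxtT
      have hcachestep :
          (match cache.get? x with
            | some _ => cache
            | none => cache.insert x nxtT).get? x = some nxtT ∧
          pvCacheOK cs (match cache.get? x with
            | some _ => cache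
            | none => cache.insert x nxtT) := by
        cases hget : cache.get? x with
        | some v =>
          constructor
          · show cache.get? x = some nxtT
            rw [hget, hcache x v hget, hnxtT]
          · exact hcache
        | none =>
          constructor
          · show (cache.insert x nxtT).get? x = some nxtT
            exact PySem.Dict.get?_insert_self _ _ _
          · intro x' v' hg
            show v' = _
            by_cases hxx : x' = x
            · subst hxx
              have hg' : (cache.insert x nxtT).get? x = some v' := hg
              rw [PySem.Dict.get?_insert_self] at hg'
              cases hg'
              rw [hnxtT]
            · have hg' : (cache.insert x nxtT).get? x' = some v' := hg
              rw [PySem.Dict.get?_insert_of_ne _ _ hxx] at hg'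
              exact hcache x' v' hg' 
      obtain ⟨hget', hok'⟩ := hcachestep
      have hglen : (pvBuildG x cs).length = cs.length + 1 := by
        rw [pvBuildG_eq]
        simp [pvGL, length_pvWalk]
      have hentry : (PySem.List.pyGet? nxtT ((iN : Nat) : Int)).getD 0
          = pvNxtVal (pvBuildG x cs) cs.length iN := by
        rw [hnxtT, pvBuildNxt_eq _ _ hglen, PySem.List.pyGet?_natCast,
          List.getElem?_map, List.getElem?_range (show iN < cs.length + 1 by omega)]
        rfl
      rw [pvLoop]
      rw [if_pos (by exact_mod_cast hlt)]
      simp only [hx, ← hnxtT, hget', Option.getD_some, hentry]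
      rw [pvGroup_step cs iN hlt 'a' a, ← pvBuildG_eq]
      rw [pvNxtVal_eq_getD]
      cases hf : pvFindIdx ((pvBuildG x cs).getD iN 0) (iN + 1) ((pvBuildG x cs).drop (iN + 1)) with
      | some q =>
        have hbounds := pvFindIdx_bounds _ _ _ _ hf
        have hql : ((pvBuildG x cs).drop (iN + 1)).length = cs.length - iN := by
          rw [List.length_drop, hglen]
          omega
        have hq1 : q ≤ cs.length := by omega
        have hq2 : iN < q := by omega
        simp only [Option.map_some, Option.getD_some]
        rw [show Int.ofNat q = ((q : Nat) : Int) from rfl]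
        rw [if_pos (by exact_mod_cast hq1)]
        rw [ih q (a + 1) _ hq1 (by omega) hok']
      | none =>
        simp only [Option.map_none, Option.getD_none]
        rw [if_neg (by omega)]
        rw [show ((cs.length : Nat) : Int) = (((cs.length : Nat) : Nat) : Int) from rfl,
          ih cs.length (a + 1) _ (le_refl _) (by omega) hok']
        rw [List.drop_length]
        rfl

-- pvAbsA is affine in the accumulator
theorem pvAbsA_add (t : List Char) :
    ∀ (x : Char) (d a b : Int), pvAbsA t x d (a + b) = pvAbsA t x d a + b := by
  induction t with
  | nil => intros; rfl
  | cons c t ih =>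
    intro x d a b
    simp only [pvAbsA]
    split
    · rw [show a + b + 1 = (a + 1) + b by ring, ih]
    · rw [ih]

-- ===== VERDICT =====
theorem solution_spec : Claim_equal_solution := by
  intro s _ hpre
  unfold Spec_solution solution solution_alt
  rcases hl : s.toList with _ | ⟨m, rest⟩
  · exact absurd (by simpa using congrArg String.ofList hl) hpre
  · show (List.foldl
      (fun (acc : Int × Int × Int × Char) (string : Char) =>
        let answer := acc.1
        let main := acc.2.1
        let sub := acc.2.2.1
        let main_s := acc.2.2.2
        let answer' := if main == sub then answer + 1 else answer
        let main_s' := if main == sub then string else main_s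
        if main_s' == string then (answer', main + 1, sub, main_s')
        else (answer', main, sub + 1, main_s'))
      (0, 1, 0, m) rest).1 + 1
      = pvLoop (m :: rest) (((m :: rest).length : Nat) : Int) ((m :: rest).length + 1) 0 0 PySem.Dict.empty
    rw [pvFoldA_eq_absA]
    have hloop := pvLoop_eq (m :: rest) ((m :: rest).length + 1) 0 0 PySem.Dict.empty
      (by omega) (by omega) (by intro x v h; rw [PySem.Dict.get?_empty] at h; cases h)
    rw [show (((0 : Nat)) : Int) = (0 : Int) from rfl] at hloop
    rw [hloop, List.drop_zero]
    have hres : pvAbsA (m :: rest) 'a' 0 0 = pvAbsA rest m 1 (0 + 1) := by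
      simp [pvAbsA]
    rw [hres, pvAbsA_add]
    norm_num
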